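-- pv_equiv track=rewrite | github.com/aaberer/python-projects | 150 11 - Recursion/recursion.py | even_odd_list
-- ===== SOURCE A (Python) =====
-- def even_odd_list(values):
--     lst = []
--     if len(values) == 0:
--         return lst
--     if values[0] % 2 == 1:
--         lst.append('Odd')
--     else:
--         lst.append('Even')
--     return lst + even_odd_list(values[1:])
-- ===== SOURCE B (Python) =====
-- def even_odd_list(values):
--     return ['Odd' if v % 2 == 1 else 'Even' for v in values]
-- ===== Notes on version B (the rewrite author's own statement) =====
-- stated objective: simpler
-- what changed: Replaces A's recursion over list slices (with list append and concatenation) by a single flat list comprehension over the elements.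
import Mathlib
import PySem

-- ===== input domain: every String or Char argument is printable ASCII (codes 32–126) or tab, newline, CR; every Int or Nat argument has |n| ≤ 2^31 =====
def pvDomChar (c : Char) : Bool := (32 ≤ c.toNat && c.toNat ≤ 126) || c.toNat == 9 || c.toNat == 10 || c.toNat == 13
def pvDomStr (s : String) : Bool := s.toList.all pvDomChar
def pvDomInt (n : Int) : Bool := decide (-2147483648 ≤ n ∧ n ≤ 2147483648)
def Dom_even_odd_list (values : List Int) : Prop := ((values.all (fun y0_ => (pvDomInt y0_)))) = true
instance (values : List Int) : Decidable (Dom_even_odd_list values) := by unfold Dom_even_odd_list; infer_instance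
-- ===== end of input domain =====

-- B replaces A's recursion over list slices by a single flat list comprehension (objective: simpler).

-- ===== PORT A =====
-- Literal port of A: empty check, classify values[0], recurse on values[1:] and concatenate.
def even_odd_list (values : List Int) : List String :=
  match values with
  | [] => []
  | v :: rest =>
    (if PySem.Int.mod v 2 = 1 then ["Odd"] else ["Even"]) ++ even_odd_list rest

-- ===== PORT B =====
def even_odd_list_alt (values : List Int) : List String :=
  values.map (fun v => if PySem.Int.mod v 2 = 1 then "Odd" else "Even")

-- ===== PRECONDITION & SPEC =====
def Spec_even_odd_list (values : List Int) (out : List String) : Prop := out = even_odd_list_alt values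
instance (values : List Int) (out : List String) : Decidable (Spec_even_odd_list values out) := by unfold Spec_even_odd_list; infer_instance

-- ===== CLAIM (what is proved, stated in full; the proofs are below) =====
def Claim_equal_even_odd_list : Prop := ∀ (values : List Int), Dom_even_odd_list values → Spec_even_odd_list values (even_odd_list values)

-- ===== LEMMAS AND PROOFS =====
theorem even_odd_list_eq_alt (values : List Int) :
    even_odd_list values = even_odd_list_alt values := by
  induction values with
  | nil => rfl
  | cons v rest ih =>
    simp [even_odd_list, even_odd_list_alt, List.map] at ih ⊢
    split_ifs <;> simp [ih]

-- ===== VERDICT (by name: the statement is the Claim_ definition above) =====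
theorem even_odd_list_spec : Claim_equal_even_odd_list := by
  intro values _
  exact even_odd_list_eq_alt values
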